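-- pv_equiv track=rewrite | github.com/schoenlucca/cifraVigenere | cifra_Vigenere.py | contador_de_trincas
-- ===== SOURCE A (Python) =====
-- import unicodedata
--
-- alfabeto = 'ABCDEFGHIJKLMNOPQRSTUVWXYZ'
--
-- def remover_acentos(texto):
--     texto = unicodedata.normalize('NFD', texto)
--     return ''.join(c for c in texto if unicodedata.category(c) != 'Mn')
--
-- def limpar_texto(texto):
--     texto = texto.upper()
--     texto = remover_acentos(texto)
--     return ''.join(c for c in texto if c in alfabeto)
--
-- def contador_de_trincas(texto):
--     texto = limpar_texto(texto)
--     frequencia_trincas = {}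
--     for i in range(len(texto)-2):
--         trinca = texto[i:i+3]
--         if frequencia_trincas.get(trinca):
--             frequencia_trincas[trinca].append(i)
--         else:
--             frequencia_trincas[trinca] = [i]
--     return frequencia_trincas
-- ===== SOURCE B (Python) =====
-- import unicodedata
--
-- alfabeto = 'ABCDEFGHIJKLMNOPQRSTUVWXYZ'
--
-- def remover_acentos(texto):
--     texto = unicodedata.normalize('NFD', texto)
--     return ''.join(c for c in texto if unicodedata.category(c) != 'Mn')
--
-- def limpar_texto(texto):
--     texto = texto.upper()
--     texto = remover_acentos(texto)
--     return ''.join(c for c in texto if c in alfabeto)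
--
-- def contador_de_trincas(texto):
--     texto = limpar_texto(texto)
--     trincas = [texto[i:i+3] for i in range(len(texto)-2)]
--     return {t: [i for i, u in enumerate(trincas) if u == t]
--             for t in dict.fromkeys(trincas)}
-- ===== Notes on version B (the rewrite author's own statement) =====
-- stated objective: alternative
-- what changed: B never builds the dict incrementally: it dedups the trigram list once (dict.fromkeys) and, for each distinct trigram, gathers all its positions with a dedicated scan of the trigram list, replacing A's single pass with per-step get/append/insert dict mutation.
import Mathlib
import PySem

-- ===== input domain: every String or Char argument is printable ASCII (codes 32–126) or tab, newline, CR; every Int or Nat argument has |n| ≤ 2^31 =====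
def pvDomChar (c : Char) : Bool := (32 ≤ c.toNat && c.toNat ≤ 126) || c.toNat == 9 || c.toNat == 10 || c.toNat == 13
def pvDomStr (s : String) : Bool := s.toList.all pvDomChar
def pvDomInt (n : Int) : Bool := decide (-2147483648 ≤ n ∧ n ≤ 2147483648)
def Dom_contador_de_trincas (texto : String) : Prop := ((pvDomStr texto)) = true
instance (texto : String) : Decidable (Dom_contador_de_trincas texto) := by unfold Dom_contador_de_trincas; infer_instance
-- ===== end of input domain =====

-- B drops the incremental dict entirely: it dedups the trigram list once and collects each
-- distinct trigram's positions with its own scan (objective: alternative; not faster).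

-- ===== PORT A =====
def pvAlfabeto : List Char := "ABCDEFGHIJKLMNOPQRSTUVWXYZ".toList

-- unicodedata.normalize('NFD', ·) followed by dropping category-'Mn' chars is the identity on the
-- printable-ASCII domain Dom_contador_de_trincas; ported as the identity (exact on Dom).
def pvRemoverAcentos (cs : List Char) : List Char := cs

def pvLimparTexto (cs : List Char) : List Char :=
  (pvRemoverAcentos (PySem.Chars.upper cs)).filter (fun c => PySem.Chars.isIn [c] pvAlfabeto)

-- loop body of A: if frequencia_trincas.get(trinca): …append(i)  else: … = [i]
def pvPassoA (d : PySem.Dict String (List Int)) (trinca : String) (i : Int) :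
    PySem.Dict String (List Int) :=
  match d.get? trinca with
  | some l => if l.isEmpty then d.insert trinca [i] else d.modify trinca [] (fun v => v ++ [i])
  | none => d.insert trinca [i]

def contador_de_trincas (texto : String) : List (String × List Int) :=
  let t := pvLimparTexto texto.toList
  let d := (PySem.List.pyRange 0 ((t.length : Int) - 2) 1).foldl
    (fun (d : PySem.Dict String (List Int)) i =>
      let trinca := String.ofList (PySem.List.slice t (some i) (some (i + 3)))
      pvPassoA d trinca i)
    PySem.Dict.empty
  d.items

-- ===== PORT B =====
def contador_de_trincas_alt (texto : String) : List (String × List Int) :=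
  let t := pvLimparTexto texto.toList
  let trincas := (PySem.List.pyRange 0 ((t.length : Int) - 2) 1).map
    (fun i => String.ofList (PySem.List.slice t (some i) (some (i + 3))))
  (PySem.List.dedup trincas).map (fun tr =>
    (tr, ((PySem.List.enumerate trincas 0).filter (fun p => p.2 == tr)).map (fun p => p.1)))

-- ===== PRECONDITION & SPEC =====
def Spec_contador_de_trincas (texto : String) (out : List (String × List Int)) : Prop := out = contador_de_trincas_alt texto
instance (texto : String) (out : List (String × List Int)) : Decidable (Spec_contador_de_trincas texto out) := by unfold Spec_contador_de_trincas; infer_instance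

-- ===== CLAIM (what is proved, stated in full; the proofs are below) =====
def Claim_equal_contador_de_trincas : Prop := ∀ (texto : String), Dom_contador_de_trincas texto → Spec_contador_de_trincas texto (contador_de_trincas texto)

-- ===== LEMMAS AND PROOFS =====

-- A's get-and-branch step is exactly d[k] = d.get(k, []) + [i], i.e. Dict.modify.
theorem pv_step_eq_modify (d : PySem.Dict String (List Int)) (tr : String) (i : Int) :
    pvPassoA d tr i = d.modify tr [] (fun v => v ++ [i]) := by
  unfold pvPassoA
  cases h : d.get? tr with
  | none => simp [PySem.Dict.modify, PySem.Dict.getD, h]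
  | some l =>
    cases hl : l.isEmpty with
    | true =>
      simp only [hl, if_true]
      simp [PySem.Dict.modify, PySem.Dict.getD, h, List.isEmpty_iff.mp hl]
    | false => simp [hl]

theorem pv_enum_map_range {α : Type} (f : Int → α) :
    ∀ (n : Nat) (a : Int),
      PySem.List.enumerate ((PySem.List.pyRange a (a + n) 1).map f) a
        = (PySem.List.pyRange a (a + n) 1).map (fun i => (i, f i))
  | 0, a => by
    simp [PySem.List.pyRange_one_eq_nil (by omega : a ≤ a)]
  | n + 1, a => by
    rw [PySem.List.pyRange_one_cons (by push_cast; omega : a < a + ((n + 1 : Nat) : Int))]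
    simp only [List.map_cons, PySem.List.enumerate_cons]
    have h2 : a + ((n + 1 : Nat) : Int) = (a + 1) + (n : Int) := by push_cast; ring
    rw [h2, pv_enum_map_range f n (a + 1)]

theorem pv_enum_map_range' {α : Type} (f : Int → α) (b : Int) :
    PySem.List.enumerate ((PySem.List.pyRange 0 b 1).map f) 0
      = (PySem.List.pyRange 0 b 1).map (fun i => (i, f i)) := by
  rcases (by omega : b ≤ 0 ∨ 0 < b) with h | h
  · simp [PySem.List.pyRange_one_eq_nil h]
  · have hb : b = (0 : Int) + (b.toNat : Int) := by omega
    rw [hb]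
    exact pv_enum_map_range f b.toNat 0

-- the common shape: A's fold of modifies, read back as a map over the deduped trigram keys
theorem pv_fold_items_eq_map (R : List Int) (T : Int → String) :
    (R.foldl (fun (d : PySem.Dict String (List Int)) i =>
        d.modify (T i) [] (fun v => v ++ [i])) PySem.Dict.empty).items
    = (PySem.List.dedup (R.map T)).map (fun tr =>
        (tr, ((R.map (fun i => (i, T i))).filter (fun p => p.2 == tr)).map (fun p => p.1))) := by
  have hfm : R.foldl (fun (d : PySem.Dict String (List Int)) i =>
      d.modify (T i) [] (fun v => v ++ [i])) PySem.Dict.empty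
      = (R.map (fun i => (T i, i))).foldl
          (fun (d : PySem.Dict String (List Int)) p =>
            d.modify p.1 [] (fun v => v ++ [p.2])) PySem.Dict.empty := by
    rw [List.foldl_map]
  have hk : (R.foldl (fun (d : PySem.Dict String (List Int)) i =>
      d.modify (T i) [] (fun v => v ++ [i])) PySem.Dict.empty).keys
      = PySem.Set.ofList (R.map T) := by
    rw [PySem.Dict.keys_foldl_modify_key R T ([] : List Int) (fun _ i => fun v => v ++ [i]),
      PySem.Dict.keys_empty, PySem.Set.update_nil_left]
  have hn : (R.foldl (fun (d : PySem.Dict String (List Int)) i =>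
      d.modify (T i) [] (fun v => v ++ [i])) PySem.Dict.empty).keys.Nodup := by
    apply PySem.Dict.nodup_keys_foldl_modify_key R T ([] : List Int) (fun _ i => fun v => v ++ [i])
    simp [PySem.Dict.keys_empty]
  rw [PySem.Dict.items_eq_map_keys _ hn ([] : List Int), hk, PySem.List.dedup_eq_ofList]
  apply List.map_congr_left
  intro k _
  rw [hfm, PySem.Dict.getD_foldl_modify_append, PySem.Dict.getD_empty, List.nil_append]
  simp only [List.filter_map, List.map_map]
  rfl

-- ===== VERDICT (by name: the statement is the Claim_ definition above) =====
theorem contador_de_trincas_spec : Claim_equal_contador_de_trincas := by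
  intro texto _
  unfold Spec_contador_de_trincas contador_de_trincas contador_de_trincas_alt
  simp only [pv_step_eq_modify, pv_enum_map_range']
  exact pv_fold_items_eq_map _ _
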